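-- pv_equiv track=rewrite | github.com/BigPolandBro/lessons | asd_task_27052024.py | get_second_maximum_index_recursion_run
-- ===== SOURCE A (Python) =====
-- def get_second_maximum_index_recursion(numbers_list, mx_ind, cur_ind = 0, pre_mx_ind = -1):
--     if cur_ind >= len(numbers_list):
--         return pre_mx_ind
--
--     if cur_ind != mx_ind and (pre_mx_ind == -1 or numbers_list[cur_ind] >= numbers_list[pre_mx_ind]):
--         pre_mx_ind = cur_ind
--
--     return get_second_maximum_index_recursion(numbers_list, mx_ind, cur_ind + 1, pre_mx_ind)
--
-- def get_second_maximum_index_recursion_run(numbers_list):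
--     if len(numbers_list) < 2:
--         return -1
--
--     mx_ind = -1
--     for cur_ind in range(len(numbers_list)):
--         if mx_ind == -1 or numbers_list[cur_ind] >= numbers_list[mx_ind]:
--             mx_ind = cur_ind
--
--     return get_second_maximum_index_recursion(numbers_list, mx_ind)
-- ===== SOURCE B (Python) =====
-- def get_second_maximum_index_recursion_run(numbers_list):
--     n = len(numbers_list)
--     if n < 2:
--         return -1
--     mx_ind = n - 1
--     pre_mx_ind = -1
--     for i in range(n - 2, -1, -1):
--         if numbers_list[i] > numbers_list[mx_ind]:
--             pre_mx_ind = mx_ind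
--             mx_ind = i
--         elif pre_mx_ind == -1 or numbers_list[i] > numbers_list[pre_mx_ind]:
--             pre_mx_ind = i
--     return pre_mx_ind
-- ===== Notes on version B (the rewrite author's own statement) =====
-- stated objective: alternative
-- what changed: Replaces A's two separate passes (a >=-update max-index loop followed by a recursive helper scanning again for the runner-up) with one backward iterative pass that tracks the max index and second-max index together, demoting the old max on a strict improvement.
import Mathlib
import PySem

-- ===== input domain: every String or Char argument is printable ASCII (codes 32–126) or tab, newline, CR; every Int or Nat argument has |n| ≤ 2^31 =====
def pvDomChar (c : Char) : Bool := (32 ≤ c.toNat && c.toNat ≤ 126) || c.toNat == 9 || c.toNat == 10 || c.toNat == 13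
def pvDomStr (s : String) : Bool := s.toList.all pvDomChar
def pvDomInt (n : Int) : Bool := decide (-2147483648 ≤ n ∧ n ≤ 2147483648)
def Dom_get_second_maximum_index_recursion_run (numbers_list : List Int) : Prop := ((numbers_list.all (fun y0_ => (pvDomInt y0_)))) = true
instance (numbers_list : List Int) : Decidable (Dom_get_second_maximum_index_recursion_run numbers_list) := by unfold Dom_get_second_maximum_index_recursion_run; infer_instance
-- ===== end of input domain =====

-- B replaces A's two passes (a max-index loop followed by a recursive runner-up scan) with
-- one backward pass tracking both indices at once; same return value (objective: alternative).

-- ===== PORT A =====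
-- literal port of the helper get_second_maximum_index_recursion; indexing via pyGetD (the
-- default 0 is never consulted: the short-circuit guards keep every evaluated index in range);
-- the Python assignment to pre_mx_ind is inlined into the tail call's argument
def get_second_maximum_index_recursion (numbers_list : List Int) (mx_ind : Int) (cur_ind : Int) (pre_mx_ind : Int) : Int :=
  if (numbers_list.length : Int) ≤ cur_ind then pre_mx_ind
  else
    get_second_maximum_index_recursion numbers_list mx_ind (cur_ind + 1)
      (if cur_ind ≠ mx_ind ∧ (pre_mx_ind = -1 ∨
          PySem.List.pyGetD numbers_list pre_mx_ind 0 ≤ PySem.List.pyGetD numbers_list cur_ind 0)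
        then cur_ind else pre_mx_ind)
termination_by ((numbers_list.length : Int) - cur_ind).toNat
decreasing_by simp only [not_le] at *; omega

def get_second_maximum_index_recursion_run (numbers_list : List Int) : Int :=
  if (numbers_list.length : Int) < 2 then -1
  else
    let mx_ind := (PySem.List.pyRange 0 (numbers_list.length : Int) 1).foldl
      (fun mx_ind cur_ind =>
        if mx_ind = -1 ∨
            PySem.List.pyGetD numbers_list mx_ind 0 ≤ PySem.List.pyGetD numbers_list cur_ind 0
          then cur_ind else mx_ind) (-1)
    get_second_maximum_index_recursion numbers_list mx_ind 0 (-1)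

-- ===== PORT B =====
def get_second_maximum_index_recursion_run_alt (numbers_list : List Int) : Int :=
  let n : Int := (numbers_list.length : Int)
  if n < 2 then -1
  else
    let s := (PySem.List.pyRange (n - 2) (-1) (-1)).foldl
      (fun (s : Int × Int) i =>
        if PySem.List.pyGetD numbers_list s.1 0 < PySem.List.pyGetD numbers_list i 0 then
          (i, s.1)
        else if s.2 = -1 ∨ PySem.List.pyGetD numbers_list s.2 0 < PySem.List.pyGetD numbers_list i 0 then
          (s.1, i)
        else s) (n - 1, -1)
    s.2

-- ===== PRECONDITION & SPEC =====
def Spec_get_second_maximum_index_recursion_run (numbers_list : List Int) (out : Int) : Prop := out = get_second_maximum_index_recursion_run_alt numbers_list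
instance (numbers_list : List Int) (out : Int) : Decidable (Spec_get_second_maximum_index_recursion_run numbers_list out) := by unfold Spec_get_second_maximum_index_recursion_run; infer_instance

-- ===== CLAIM (what is proved, stated in full; the proofs are below) =====
def Claim_equal_get_second_maximum_index_recursion_run : Prop := ∀ (numbers_list : List Int), Dom_get_second_maximum_index_recursion_run numbers_list → Spec_get_second_maximum_index_recursion_run numbers_list (get_second_maximum_index_recursion_run numbers_list)

-- ===== LEMMAS AND PROOFS =====

-- value at index i (the indices reasoned about are always in range, the default is irrelevant)
def pvG (xs : List Int) (i : Int) : Int := PySem.List.pyGetD xs i 0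

-- m is the LAST index of the maximum value on the interval [a, b)
def IsLastMax (xs : List Int) (a b m : Int) : Prop :=
  a ≤ m ∧ m < b ∧ (∀ j, a ≤ j → j < b → pvG xs j ≤ pvG xs m) ∧
    (∀ j, m < j → j < b → pvG xs j < pvG xs m)

-- p is the LAST index of the maximum value on [a, b) \ {mx}
def IsLastMaxExcl (xs : List Int) (a b mx p : Int) : Prop :=
  a ≤ p ∧ p < b ∧ p ≠ mx ∧ (∀ j, a ≤ j → j < b → j ≠ mx → pvG xs j ≤ pvG xs p) ∧
    (∀ j, p < j → j < b → j ≠ mx → pvG xs j < pvG xs p)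

theorem IsLastMax_unique {xs : List Int} {a b m m' : Int}
    (h : IsLastMax xs a b m) (h' : IsLastMax xs a b m') : m = m' := by
  obtain ⟨h1, h2, h3, h4⟩ := h
  obtain ⟨h1', h2', h3', h4'⟩ := h'
  rcases lt_trichotomy m m' with hlt | he | hgt
  · have ha := h4 m' hlt h2'
    have hb := h3' m h1 h2
    omega
  · exact he
  · have ha := h4' m hgt h2
    have hb := h3 m' h1' h2'
    omega

theorem IsLastMaxExcl_unique {xs : List Int} {a b mx p p' : Int}
    (h : IsLastMaxExcl xs a b mx p) (h' : IsLastMaxExcl xs a b mx p') : p = p' := by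
  obtain ⟨h1, h2, hne, h3, h4⟩ := h
  obtain ⟨h1', h2', hne', h3', h4'⟩ := h'
  rcases lt_trichotomy p p' with hlt | he | hgt
  · have ha := h4 p' hlt h2' hne'
    have hb := h3' p h1 h2 hne
    omega
  · exact he
  · have ha := h4' p hgt h2 hne
    have hb := h3 p' h1' h2' hne'
    omega

-- A's first loop computes the last index of the maximum on [0, m)
theorem A_loop_spec (xs : List Int) (m : Nat) (hm : 1 ≤ m) :
    IsLastMax xs 0 (m : Int) ((PySem.List.pyRange 0 (m : Int) 1).foldl
      (fun mx_ind cur_ind =>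
        if mx_ind = -1 ∨
            PySem.List.pyGetD xs mx_ind 0 ≤ PySem.List.pyGetD xs cur_ind 0
          then cur_ind else mx_ind) (-1)) := by
  induction m with
  | zero => omega
  | succ m ih =>
    by_cases h0 : m = 0
    · subst h0
      have h1 : PySem.List.pyRange 0 ((0 : Nat) + 1 : Nat) 1 = [0] := by
        have := PySem.List.pyRange_one_singleton (a := 0)
        simpa using this
      rw [h1]
      simp only [List.foldl_cons, List.foldl_nil]
      rw [if_pos (Or.inl trivial)]
      refine ⟨le_refl 0, by simp, ?_, ?_⟩
      · intro j hj1 hj2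
        have : j = 0 := by omega
        subst this; exact le_rfl
      · intro j hj1 hj2
        exact absurd hj2 (by omega)
    · have hm1 : 1 ≤ m := by omega
      have ih' := ih hm1
      have hsplit : PySem.List.pyRange 0 ((m + 1 : Nat) : Int) 1 =
          PySem.List.pyRange 0 (m : Int) 1 ++ [(m : Int)] := by
        push_cast
        exact PySem.List.pyRange_one_succ_right (by positivity)
      rw [hsplit, List.foldl_append]
      simp only [List.foldl_cons, List.foldl_nil]
      obtain ⟨hr0, hrm, hmax, hlast⟩ := ih'
      set r := (PySem.List.pyRange 0 (m : Int) 1).foldl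
        (fun mx_ind cur_ind =>
          if mx_ind = -1 ∨
              PySem.List.pyGetD xs mx_ind 0 ≤ PySem.List.pyGetD xs cur_ind 0
            then cur_ind else mx_ind) (-1) with hrdef
      by_cases hc : PySem.List.pyGetD xs r 0 ≤ PySem.List.pyGetD xs (m : Int) 0
      · rw [if_pos (Or.inr hc)]
        refine ⟨by positivity, by push_cast; omega, ?_, ?_⟩
        · intro j hj1 hj2
          by_cases hjm : j = (m : Int)
          · subst hjm; exact le_rfl
          · have hj2' : j < (m : Int) := by push_cast at hj2; omega
            exact le_trans (hmax j hj1 hj2') hc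
        · intro j hj1 hj2
          push_cast at hj2
          exact absurd hj1 (by omega)
      · rw [if_neg (by rintro (h | h) <;> omega)]
        have hcm : pvG xs (m : Int) < pvG xs r := by
          simp only [pvG]; omega
        refine ⟨hr0, by push_cast; omega, ?_, ?_⟩
        · intro j hj1 hj2
          by_cases hjm : j = (m : Int)
          · subst hjm; exact le_of_lt hcm
          · exact hmax j hj1 (by push_cast at hj2 ⊢; omega)
        · intro j hj1 hj2
          by_cases hjm : j = (m : Int)
          · subst hjm; exact hcm
          · exact hlast j hj1 (by push_cast at hj2 ⊢; omega)

-- A's recursion extends the runner-up invariant from [0, cur) to [0, len)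
theorem A_rec_spec (xs : List Int) (mx : Int) (cur pre : Int)
    (hcur : 0 ≤ cur) (hcn : cur ≤ (xs.length : Int))
    (hinv : (pre = -1 ∧ ∀ j, 0 ≤ j → j < cur → j = mx) ∨ IsLastMaxExcl xs 0 cur mx pre) :
    (get_second_maximum_index_recursion xs mx cur pre = -1 ∧
        ∀ j, 0 ≤ j → j < (xs.length : Int) → j = mx) ∨
      IsLastMaxExcl xs 0 (xs.length : Int) mx (get_second_maximum_index_recursion xs mx cur pre) := by
  obtain ⟨k, hk⟩ : ∃ k, ((xs.length : Int) - cur).toNat = k := ⟨_, rfl⟩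
  induction k generalizing cur pre with
  | zero =>
    have hce : cur = (xs.length : Int) := by omega
    rw [get_second_maximum_index_recursion, if_pos (by omega)]
    rw [hce] at hinv
    rcases hinv with ⟨h1, h2⟩ | h
    · exact Or.inl ⟨h1, h2⟩
    · exact Or.inr h
  | succ k ih =>
    have hlt : cur < (xs.length : Int) := by omega
    rw [get_second_maximum_index_recursion, if_neg (by omega)]
    apply ih (cur + 1) _ (by omega) (by omega) ?_ (by omega)
    by_cases hcm : cur = mx
    · rw [if_neg (by simp [hcm])]
      rcases hinv with ⟨h1, h2⟩ | ⟨h1, h2, h3, h4, h5⟩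
      · refine Or.inl ⟨h1, ?_⟩
        intro j hj1 hj2
        by_cases hjc : j = cur
        · rw [hjc, hcm]
        · exact h2 j hj1 (by omega)
      · refine Or.inr ⟨h1, by omega, h3, ?_, ?_⟩
        · intro j hj1 hj2 hjmx
          have : j < cur := by omega
          exact h4 j hj1 this hjmx
        · intro j hj1 hj2 hjmx
          have : j < cur := by omega
          exact h5 j hj1 this hjmx
    · rcases hinv with ⟨h1, h2⟩ | ⟨h1, h2, h3, h4, h5⟩
      · rw [if_pos ⟨hcm, Or.inl h1⟩]
        refine Or.inr ⟨hcur, by omega, hcm, ?_, ?_⟩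
        · intro j hj1 hj2 hjmx
          by_cases hjc : j = cur
          · subst hjc; exact le_rfl
          · exact absurd (h2 j hj1 (by omega)) hjmx
        · intro j hj1 hj2 hjmx
          exact absurd hj2 (by omega)
      · have hpre0 : pre ≠ -1 := by omega
        by_cases hc : PySem.List.pyGetD xs pre 0 ≤ PySem.List.pyGetD xs cur 0
        · rw [if_pos ⟨hcm, Or.inr hc⟩]
          refine Or.inr ⟨hcur, by omega, hcm, ?_, ?_⟩
          · intro j hj1 hj2 hjmx
            by_cases hjc : j = cur
            · subst hjc; exact le_rfl
            · exact le_trans (h4 j hj1 (by omega) hjmx) hc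
          · intro j hj1 hj2 hjmx
            exact absurd hj2 (by omega)
        · rw [if_neg (by rintro ⟨-, h | h⟩ <;> omega)]
          have hcpre : pvG xs cur < pvG xs pre := by simp only [pvG]; omega
          refine Or.inr ⟨h1, by omega, h3, ?_, ?_⟩
          · intro j hj1 hj2 hjmx
            by_cases hjc : j = cur
            · subst hjc; exact le_of_lt hcpre
            · exact h4 j hj1 (by omega) hjmx
          · intro j hj1 hj2 hjmx
            by_cases hjc : j = cur
            · subst hjc; exact hcpre
            · exact h5 j hj1 (by omega) hjmx

-- B's loop invariant: the state describes the already-processed suffix [j+1, len)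
def InvB (xs : List Int) (j : Int) (s : Int × Int) : Prop :=
  IsLastMax xs (j + 1) (xs.length : Int) s.1 ∧
    ((s.2 = -1 ∧ ∀ i, j + 1 ≤ i → i < (xs.length : Int) → i = s.1) ∨
      IsLastMaxExcl xs (j + 1) (xs.length : Int) s.1 s.2)

theorem B_loop_spec (xs : List Int) (j : Int) (hj : -1 ≤ j)
    (hjn : j ≤ (xs.length : Int) - 2) (s : Int × Int) (hs : InvB xs j s) :
    InvB xs (-1) ((PySem.List.pyRange j (-1) (-1)).foldl
      (fun (s : Int × Int) i =>
        if PySem.List.pyGetD xs s.1 0 < PySem.List.pyGetD xs i 0 then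
          (i, s.1)
        else if s.2 = -1 ∨ PySem.List.pyGetD xs s.2 0 < PySem.List.pyGetD xs i 0 then
          (s.1, i)
        else s) s) := by
  obtain ⟨k, hk⟩ : ∃ k, (j + 1).toNat = k := ⟨_, rfl⟩
  induction k generalizing j s with
  | zero =>
    have hje : j = -1 := by omega
    subst hje
    rw [PySem.List.pyRange_neg_one_eq_nil (by omega)]
    exact hs
  | succ k ih =>
    have hj0 : 0 ≤ j := by omega
    rw [PySem.List.pyRange_neg_one_cons (by omega), List.foldl_cons]
    apply ih (j - 1) (by omega) (by omega) _ ?_ (by omega)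
    obtain ⟨⟨hm1, hm2, hm3, hm4⟩, hp⟩ := hs
    by_cases hc1 : PySem.List.pyGetD xs s.1 0 < PySem.List.pyGetD xs j 0
    · rw [if_pos hc1]
      constructor
      · refine ⟨by omega, by omega, ?_, ?_⟩
        · intro i hi1 hi2
          by_cases hij : i = j
          · subst hij; exact le_rfl
          · have := hm3 i (by omega) hi2
            simp only [pvG] at this ⊢
            omega
        · intro i hi1 hi2
          have := hm3 i (by omega) hi2
          simp only [pvG] at this ⊢
          omega
      · refine Or.inr ⟨by omega, hm2, by omega, ?_, ?_⟩
        · intro i hi1 hi2 hij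
          exact hm3 i (by omega) hi2
        · intro i hi1 hi2 hij
          exact hm4 i hi1 hi2
    · rw [if_neg hc1]
      have hjm : pvG xs j ≤ pvG xs s.1 := by simp only [pvG]; omega
      have hmax' : IsLastMax xs (j - 1 + 1) (xs.length : Int) s.1 := by
        refine ⟨by omega, hm2, ?_, ?_⟩
        · intro i hi1 hi2
          by_cases hij : i = j
          · subst hij; exact hjm
          · exact hm3 i (by omega) hi2
        · intro i hi1 hi2
          exact hm4 i hi1 hi2
      rcases hp with ⟨hp1, hp2⟩ | ⟨hp1, hp2, hp3, hp4, hp5⟩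
      · rw [if_pos (Or.inl hp1)]
        refine ⟨hmax', Or.inr ⟨by omega, by omega, by omega, ?_, ?_⟩⟩
        · intro i hi1 hi2 his
          by_cases hij : i = j
          · subst hij; exact le_rfl
          · exact absurd (hp2 i (by omega) hi2) his
        · intro i hi1 hi2 his
          have := hp2 i (by omega) hi2
          exact absurd this his
      · have hp0 : s.2 ≠ -1 := by omega
        by_cases hc2 : PySem.List.pyGetD xs s.2 0 < PySem.List.pyGetD xs j 0
        · rw [if_pos (Or.inr hc2)]
          refine ⟨hmax', Or.inr ⟨by omega, by omega, by omega, ?_, ?_⟩⟩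
          · intro i hi1 hi2 his
            by_cases hij : i = j
            · subst hij; exact le_rfl
            · have := hp4 i (by omega) hi2 his
              simp only [pvG] at this ⊢
              omega
          · intro i hi1 hi2 his
            have := hp4 i (by omega) hi2 his
            simp only [pvG] at this ⊢
            omega
        · rw [if_neg (by rintro (h | h) <;> omega)]
          refine ⟨hmax', Or.inr ⟨by omega, hp2, hp3, ?_, ?_⟩⟩
          · intro i hi1 hi2 his
            by_cases hij : i = j
            · subst hij
              simp only [pvG] at *
              omega
            · exact hp4 i (by omega) hi2 his
          · intro i hi1 hi2 his
            exact hp5 i hi1 hi2 his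

-- combining the three invariants: the two programs agree for len ≥ 2
theorem pv_main (xs : List Int) (hn : 2 ≤ (xs.length : Int)) :
    get_second_maximum_index_recursion xs
        ((PySem.List.pyRange 0 (xs.length : Int) 1).foldl
          (fun mx_ind cur_ind =>
            if mx_ind = -1 ∨
                PySem.List.pyGetD xs mx_ind 0 ≤ PySem.List.pyGetD xs cur_ind 0
              then cur_ind else mx_ind) (-1)) 0 (-1) =
      ((PySem.List.pyRange ((xs.length : Int) - 2) (-1) (-1)).foldl
        (fun (s : Int × Int) i =>
          if PySem.List.pyGetD xs s.1 0 < PySem.List.pyGetD xs i 0 then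
            (i, s.1)
          else if s.2 = -1 ∨ PySem.List.pyGetD xs s.2 0 < PySem.List.pyGetD xs i 0 then
            (s.1, i)
          else s) ((xs.length : Int) - 1, -1)).2 := by
  have hA := A_loop_spec xs xs.length (by omega)
  set mxA := (PySem.List.pyRange 0 (xs.length : Int) 1).foldl
    (fun mx_ind cur_ind =>
      if mx_ind = -1 ∨
          PySem.List.pyGetD xs mx_ind 0 ≤ PySem.List.pyGetD xs cur_ind 0
        then cur_ind else mx_ind) (-1) with hmxA
  have hArec := A_rec_spec xs mxA 0 (-1) (by omega) (by omega)
    (Or.inl ⟨rfl, by intro j h1 h2; omega⟩)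
  have hsB : InvB xs ((xs.length : Int) - 2) ((xs.length : Int) - 1, -1) := by
    refine ⟨⟨by omega, by omega, ?_, ?_⟩, Or.inl ⟨rfl, by intro i h1 h2; simp; omega⟩⟩
    · intro i hi1 hi2
      have : i = (xs.length : Int) - 1 := by omega
      subst this; exact le_rfl
    · intro i hi1 hi2
      exact absurd hi2 (by omega)
  have hB := B_loop_spec xs ((xs.length : Int) - 2) (by omega) (by omega) _ hsB
  set sB := (PySem.List.pyRange ((xs.length : Int) - 2) (-1) (-1)).foldl
    (fun (s : Int × Int) i =>
      if PySem.List.pyGetD xs s.1 0 < PySem.List.pyGetD xs i 0 then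
        (i, s.1)
      else if s.2 = -1 ∨ PySem.List.pyGetD xs s.2 0 < PySem.List.pyGetD xs i 0 then
        (s.1, i)
      else s) ((xs.length : Int) - 1, -1) with hsBdef
  obtain ⟨hBm, hBp⟩ := hB
  have hBm0 : IsLastMax xs 0 (xs.length : Int) sB.1 := by
    have : (-1 : Int) + 1 = 0 := by omega
    rwa [this] at hBm
  have hmeq : mxA = sB.1 := IsLastMax_unique hA hBm0
  rcases hArec with ⟨_, hall⟩ | hAex
  · have h0 := hall 0 (by omega) (by omega)
    have h1 := hall 1 (by omega) (by omega)
    omega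
  · rcases hBp with ⟨_, hall⟩ | hBex
    · have h0 := hall 0 (by omega) (by omega)
      have h1 := hall 1 (by omega) (by omega)
      obtain ⟨hm1, hm2, _, _⟩ := hBm0
      omega
    · have hBex0 : IsLastMaxExcl xs 0 (xs.length : Int) sB.1 sB.2 := by
        have : (-1 : Int) + 1 = 0 := by omega
        rwa [this] at hBex
      rw [← hmeq] at hBex0
      exact IsLastMaxExcl_unique hAex hBex0

-- ===== VERDICT (by name: the statement is the Claim_ definition above) =====
theorem get_second_maximum_index_recursion_run_spec : Claim_equal_get_second_maximum_index_recursion_run := by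
  intro xs _
  unfold Spec_get_second_maximum_index_recursion_run
  unfold get_second_maximum_index_recursion_run get_second_maximum_index_recursion_run_alt
  by_cases hn : (xs.length : Int) < 2
  · simp only [hn, if_true]
  · simp only [hn, if_false]
    exact pv_main xs (by omega)
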